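-- pv_equiv track=rewrite | github.com/JiaoLab2021/PHap | utils/find_longest_subsequence.py | filter_contained_alignments
-- ===== SOURCE A (Python) =====
-- def filter_contained_alignments(alignments):   # 时间消耗：1m20.517s
--     ''' 过滤包含 alignment，只对同一个 query 且在同一条染色体上的 alignments 进行处理 '''
--     n = len(alignments)
--     to_remove = set()
--     for i in range(n):
--         for j in range(n):
--             if i != j and alignments[i][0] == alignments[j][0] and alignments[i][5] == alignments[j][5]:
--                 # 检查对齐i是否被对齐j包含
--                 if (int(alignments[j][7]) <= int(alignments[i][7]) and int(alignments[j][8]) >= int(alignments[i][8])):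
--                     to_remove.add(i)
--                 # 检查对齐j是否被对齐i包含
--                 elif (int(alignments[i][7]) <= int(alignments[j][7]) and int(alignments[i][8]) >= int(alignments[j][8])):
--                     to_remove.add(j)
--     return [alignments[i] for i in range(n) if i not in to_remove]
-- ===== SOURCE B (Python) =====
-- def filter_contained_alignments(alignments):
--     """Group indices by query, then by chromosome; sort each (query, chrom) group by
--     (start asc, end desc) and one duplicate-aware sweep per group marks contained
--     alignments; O(n log n)."""
--     if len(alignments) < 2:
--         return list(alignments)
--     byq = {}
--     for k, a in enumerate(alignments):
--         byq.setdefault(a[0], []).append(k)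
--     removed = set()
--     for idxs in byq.values():
--         if len(idxs) < 2:
--             continue
--         byc = {}
--         for k in idxs:
--             byc.setdefault(alignments[k][5], []).append(k)
--         for ks in byc.values():
--             if len(ks) < 2:
--                 continue
--             items = sorted(((int(alignments[k][7]), int(alignments[k][8]), k) for k in ks),
--                            key=lambda t: (t[0], -t[1]))
--             max_end = None
--             for pos, (s, e, idx) in enumerate(items):
--                 nxt = items[pos + 1] if pos + 1 < len(items) else None
--                 if (max_end is not None and max_end >= e) or \
--                    (nxt is not None and nxt[0] == s and nxt[1] == e):
--                     removed.add(idx)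
--                 max_end = e if max_end is None else max(max_end, e)
--     return [a for k, a in enumerate(alignments) if k not in removed]
-- ===== Notes on version B (the rewrite author's own statement) =====
-- stated objective: faster
-- what changed: Replaced A's all-pairs double scan with grouping by (query, chrom) in a dict, sorting each group by (start asc, end desc) and a single duplicate-aware sweep tracking the running max end.
import Mathlib
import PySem

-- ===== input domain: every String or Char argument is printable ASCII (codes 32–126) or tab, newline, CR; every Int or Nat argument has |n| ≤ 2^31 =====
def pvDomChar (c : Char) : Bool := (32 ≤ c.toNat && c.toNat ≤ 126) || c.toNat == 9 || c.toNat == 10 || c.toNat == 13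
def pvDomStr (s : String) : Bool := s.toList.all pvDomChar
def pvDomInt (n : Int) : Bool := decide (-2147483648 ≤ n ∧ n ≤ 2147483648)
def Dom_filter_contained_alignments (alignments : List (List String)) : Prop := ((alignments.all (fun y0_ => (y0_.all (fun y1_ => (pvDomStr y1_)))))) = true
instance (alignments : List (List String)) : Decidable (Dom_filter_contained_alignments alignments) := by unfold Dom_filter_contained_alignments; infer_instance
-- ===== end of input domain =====

-- B replaces A's all-pairs double scan by grouping indices by query and chromosome, sorting
-- each group by (start asc, end desc) and marking contained alignments in one sweep per group.

-- field accessors shared by both ports (alignments[i][0], [5], int(alignments[i][7]), int(alignments[i][8]))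
def pvRowQ (a : List String) : String := PySem.List.pyGetD a 0 ""
def pvRowC (a : List String) : String := PySem.List.pyGetD a 5 ""
def pvRowS (a : List String) : Int := (PySem.Int.ofStr? (PySem.List.pyGetD a 7 "")).getD 0
def pvRowE (a : List String) : Int := (PySem.Int.ofStr? (PySem.List.pyGetD a 8 "")).getD 0

-- ===== PORT A =====
def filter_contained_alignments (alignments : List (List String)) : List (List String) :=
  let n : Int := PySem.List.len alignments
  let to_remove : PySem.Set Int :=
    (PySem.List.pyRange 0 n 1).foldl (fun acc i =>
      (PySem.List.pyRange 0 n 1).foldl (fun acc j =>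
        let ai := PySem.List.pyGetD alignments i []
        let aj := PySem.List.pyGetD alignments j []
        if i ≠ j ∧ pvRowQ ai = pvRowQ aj ∧ pvRowC ai = pvRowC aj then
          if pvRowS aj ≤ pvRowS ai ∧ pvRowE aj ≥ pvRowE ai then PySem.Set.add acc i
          else if pvRowS ai ≤ pvRowS aj ∧ pvRowE ai ≥ pvRowE aj then PySem.Set.add acc j
          else acc
        else acc) acc) PySem.Set.empty
  ((PySem.List.pyRange 0 n 1).filter (fun i => !(PySem.Set.contains to_remove i))).map
    (fun i => PySem.List.pyGetD alignments i [])

-- ===== PORT B =====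
def pvTriple (k : Int) (a : List String) : Int × Int × Int := (pvRowS a, pvRowE a, k)

-- the per-group sweep over the sorted items, carrying max_end and the removed set
def pvSweep : List (Int × Int × Int) → Option Int → PySem.Set Int → PySem.Set Int
  | [], _, removed => removed
  | t :: rest, maxEnd, removed =>
    let contained :=
      (match maxEnd with | some m => decide (t.2.1 ≤ m) | none => false) ||
      (match rest with | u :: _ => decide (u.1 = t.1) && decide (u.2.1 = t.2.1) | [] => false)
    let removed' := if contained then PySem.Set.add removed t.2.2 else removed
    let maxEnd' : Option Int := some (match maxEnd with | some m => max m t.2.1 | none => t.2.1)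
    pvSweep rest maxEnd' removed'

def filter_contained_alignments_alt (alignments : List (List String)) : List (List String) :=
  if PySem.List.len alignments < 2 then alignments
  else
    let byq : PySem.Dict String (List Int) :=
      (PySem.List.enumerate alignments).foldl
        (fun d p => d.modify (pvRowQ p.2) [] (fun l => l ++ [p.1])) PySem.Dict.empty
    let removed : PySem.Set Int :=
      byq.values.foldl (fun rem idxs =>
        if idxs.length < 2 then rem
        else
          let byc : PySem.Dict String (List Int) :=
            idxs.foldl (fun d k =>
              d.modify (pvRowC (PySem.List.pyGetD alignments k [])) [] (fun l => l ++ [k]))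
              PySem.Dict.empty
          byc.values.foldl (fun rem ks =>
            if ks.length < 2 then rem
            else
              pvSweep (PySem.List.sorted2
                  (ks.map (fun k => pvTriple k (PySem.List.pyGetD alignments k [])))
                  (fun t => t.1) (fun t => -t.2.1)) none rem) rem) PySem.Set.empty
    ((PySem.List.enumerate alignments).filter (fun p => !(PySem.Set.contains removed p.1))).map
      (fun p => p.2)

-- ===== PRECONDITION & SPEC =====
-- Pre_ is exactly the set of inputs on which A returns (no exception): with fewer than two
-- rows A reads no field at all; otherwise every row needs a field 0, rows whose query is
-- shared need a field 5, and rows whose query and chromosome are shared need int-parseable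
-- fields 7 and 8 — outside this A raises IndexError or ValueError.
def Pre_filter_contained_alignments (alignments : List (List String)) : Prop :=
  2 ≤ alignments.length →
  (∀ a ∈ alignments, 1 ≤ a.length) ∧
  ∀ i ∈ List.range alignments.length, ∀ j ∈ List.range alignments.length, i ≠ j →
    (pvRowQ (alignments.getD i []) = pvRowQ (alignments.getD j []) →
      6 ≤ (alignments.getD i []).length ∧
      (pvRowC (alignments.getD i []) = pvRowC (alignments.getD j []) →
        9 ≤ (alignments.getD i []).length ∧
        (PySem.Int.ofStr? (PySem.List.pyGetD (alignments.getD i []) 7 "")).isSome = true ∧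
        (PySem.Int.ofStr? (PySem.List.pyGetD (alignments.getD i []) 8 "")).isSome = true))
instance (alignments : List (List String)) : Decidable (Pre_filter_contained_alignments alignments) := by
  unfold Pre_filter_contained_alignments; infer_instance

def pvWitness_filter_contained_alignments : List (List String) :=
  [["q1", "a", "b", "c", "d", "chr1", "e", "1", "9"],
   ["q1", "a", "b", "c", "d", "chr1", "e", "2", "5"]]

def Spec_filter_contained_alignments (alignments : List (List String)) (out : List (List String)) : Prop := out = filter_contained_alignments_alt alignments
instance (alignments : List (List String)) (out : List (List String)) : Decidable (Spec_filter_contained_alignments alignments out) := by unfold Spec_filter_contained_alignments; infer_instance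

-- ===== CLAIM (what is proved, stated in full; the proofs are below) =====
def Claim_equal_filter_contained_alignments : Prop := ∀ (alignments : List (List String)), Dom_filter_contained_alignments alignments → Pre_filter_contained_alignments alignments → Spec_filter_contained_alignments alignments (filter_contained_alignments alignments)

-- ===== LEMMAS AND PROOFS =====

-- the row at Int index i, and the common "some other alignment of the same group contains i"
def pvKey (a : List String) : String × String := (pvRowQ a, pvRowC a)
def pvRow (al : List (List String)) (i : Int) : List String := PySem.List.pyGetD al i []
def pvRem (al : List (List String)) (x : Int) : Prop :=
  ∃ j, j ∈ PySem.List.pyRange 0 (PySem.List.len al) 1 ∧ j ≠ x ∧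
    pvKey (pvRow al j) = pvKey (pvRow al x) ∧
    pvRowS (pvRow al j) ≤ pvRowS (pvRow al x) ∧ pvRowE (pvRow al x) ≤ pvRowE (pvRow al j)

-- what one inner-loop iteration of A may add
def pvP (al : List (List String)) (i j x : Int) : Prop :=
  (i ≠ j ∧ pvRowQ (pvRow al i) = pvRowQ (pvRow al j) ∧ pvRowC (pvRow al i) = pvRowC (pvRow al j)) ∧
  ((pvRowS (pvRow al j) ≤ pvRowS (pvRow al i) ∧ pvRowE (pvRow al j) ≥ pvRowE (pvRow al i)) ∧ x = i ∨
   (¬ (pvRowS (pvRow al j) ≤ pvRowS (pvRow al i) ∧ pvRowE (pvRow al j) ≥ pvRowE (pvRow al i)) ∧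
    (pvRowS (pvRow al i) ≤ pvRowS (pvRow al j) ∧ pvRowE (pvRow al i) ≥ pvRowE (pvRow al j)) ∧ x = j))

lemma pvA_inner_mem (al : List (List String)) (L : List Int) (i x : Int) (acc : PySem.Set Int) :
    x ∈ L.foldl (fun acc j =>
        let ai := PySem.List.pyGetD al i []
        let aj := PySem.List.pyGetD al j []
        if i ≠ j ∧ pvRowQ ai = pvRowQ aj ∧ pvRowC ai = pvRowC aj then
          if pvRowS aj ≤ pvRowS ai ∧ pvRowE aj ≥ pvRowE ai then PySem.Set.add acc i
          else if pvRowS ai ≤ pvRowS aj ∧ pvRowE ai ≥ pvRowE aj then PySem.Set.add acc j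
          else acc
        else acc) acc ↔ x ∈ acc ∨ ∃ j ∈ L, pvP al i j x := by
  induction L generalizing acc with
  | nil => simp
  | cons j L ih =>
    simp only [List.foldl_cons]
    rw [ih, List.exists_mem_cons_iff]
    have hstep : ∀ (s : PySem.Set Int),
        (x ∈ (let ai := PySem.List.pyGetD al i []
              let aj := PySem.List.pyGetD al j []
              if i ≠ j ∧ pvRowQ ai = pvRowQ aj ∧ pvRowC ai = pvRowC aj then
                if pvRowS aj ≤ pvRowS ai ∧ pvRowE aj ≥ pvRowE ai then PySem.Set.add s i
                else if pvRowS ai ≤ pvRowS aj ∧ pvRowE ai ≥ pvRowE aj then PySem.Set.add s j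
                else s
              else s)) ↔ x ∈ s ∨ pvP al i j x := by
      intro s
      unfold pvP pvRow
      dsimp only
      split_ifs with h1 h2 h3
      · rw [PySem.Set.mem_add]
        constructor
        · rintro (h | h)
          · exact Or.inl h
          · exact Or.inr ⟨h1, Or.inl ⟨h2, h⟩⟩
        · rintro (h | ⟨_, (⟨_, h⟩ | ⟨hn, _, _⟩)⟩)
          · exact Or.inl h
          · exact Or.inr h
          · exact absurd h2 hn
      · rw [PySem.Set.mem_add]
        constructor
        · rintro (h | h)
          · exact Or.inl h
          · exact Or.inr ⟨h1, Or.inr ⟨h2, h3, h⟩⟩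
        · rintro (h | ⟨_, (⟨h', hx⟩ | ⟨_, _, h⟩)⟩)
          · exact Or.inl h
          · exact absurd h' h2
          · exact Or.inr h
      · constructor
        · exact Or.inl
        · rintro (h | ⟨_, (⟨h', _⟩ | ⟨_, h', _⟩)⟩)
          · exact h
          · exact absurd h' h2
          · exact absurd h' h3
      · constructor
        · exact Or.inl
        · rintro (h | ⟨h', _⟩)
          · exact h
          · exact absurd h' h1
    rw [hstep]
    tauto

lemma pvA_mem (al : List (List String)) (x : Int) :
    x ∈ (PySem.List.pyRange 0 (PySem.List.len al) 1).foldl (fun acc i =>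
        (PySem.List.pyRange 0 (PySem.List.len al) 1).foldl (fun acc j =>
          let ai := PySem.List.pyGetD al i []
          let aj := PySem.List.pyGetD al j []
          if i ≠ j ∧ pvRowQ ai = pvRowQ aj ∧ pvRowC ai = pvRowC aj then
            if pvRowS aj ≤ pvRowS ai ∧ pvRowE aj ≥ pvRowE ai then PySem.Set.add acc i
            else if pvRowS ai ≤ pvRowS aj ∧ pvRowE ai ≥ pvRowE aj then PySem.Set.add acc j
            else acc
          else acc) acc) PySem.Set.empty ↔
      x ∈ PySem.List.pyRange 0 (PySem.List.len al) 1 ∧ pvRem al x := by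
  have houter : ∀ (L : List Int) (acc : PySem.Set Int),
      x ∈ L.foldl (fun acc i =>
        (PySem.List.pyRange 0 (PySem.List.len al) 1).foldl (fun acc j =>
          let ai := PySem.List.pyGetD al i []
          let aj := PySem.List.pyGetD al j []
          if i ≠ j ∧ pvRowQ ai = pvRowQ aj ∧ pvRowC ai = pvRowC aj then
            if pvRowS aj ≤ pvRowS ai ∧ pvRowE aj ≥ pvRowE ai then PySem.Set.add acc i
            else if pvRowS ai ≤ pvRowS aj ∧ pvRowE ai ≥ pvRowE aj then PySem.Set.add acc j
            else acc
          else acc) acc) acc ↔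
        x ∈ acc ∨ ∃ i ∈ L, ∃ j ∈ PySem.List.pyRange 0 (PySem.List.len al) 1, pvP al i j x := by
    intro L
    induction L with
    | nil => simp
    | cons i L ih =>
      intro acc
      simp only [List.foldl_cons]
      rw [ih, pvA_inner_mem, List.exists_mem_cons_iff]
      exact or_assoc
  rw [houter]
  have hempty : x ∉ (PySem.Set.empty : PySem.Set Int) := by simp [PySem.Set.empty]
  constructor
  · rintro (h | ⟨i, hi, j, hj, ⟨⟨hne, hq, hc⟩, hcase⟩⟩)
    · exact absurd h hempty
    · rcases hcase with ⟨⟨hs, he⟩, rfl⟩ | ⟨_, ⟨hs, he⟩, rfl⟩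
      · refine ⟨hi, j, hj, fun h => hne h.symm, ?_, hs, he⟩
        unfold pvKey; rw [hq, hc]
      · refine ⟨hj, i, hi, fun h => hne h, ?_, hs, he⟩
        unfold pvKey; rw [hq, hc]
  · rintro ⟨hx, j, hj, hne, hkey, hs, he⟩
    simp only [pvKey, Prod.mk.injEq] at hkey
    exact Or.inr ⟨x, hx, j, hj, ⟨fun h => hne h.symm, hkey.1.symm, hkey.2.symm⟩,
      Or.inl ⟨⟨hs, he⟩, rfl⟩⟩

-- ordering used for the per-group sweep
def pvLexLE (t u : Int × Int × Int) : Prop := t.1 < u.1 ∨ (t.1 = u.1 ∧ u.2.1 ≤ t.2.1)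
def pvMGE : Option Int → Int → Prop
  | none, _ => False
  | some m, y => y ≤ m

def pvBefore (a b : Int × Int × Int) : Bool :=
  decide (a.1 < b.1) || (!decide (b.1 < a.1) && decide (-a.2.1 < -b.2.1))

lemma pvBefore_true {a b : Int × Int × Int} (h : pvBefore a b = true) : pvLexLE a b := by
  simp only [pvBefore, Bool.or_eq_true, Bool.and_eq_true, Bool.not_eq_true',
    decide_eq_true_eq, decide_eq_false_iff_not] at h
  unfold pvLexLE
  omega

lemma pvBefore_false {a b : Int × Int × Int} (h : pvBefore a b = false) : pvLexLE b a := by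
  simp only [pvBefore, Bool.or_eq_false_iff, Bool.and_eq_false_iff, Bool.not_eq_false',
    decide_eq_true_eq, decide_eq_false_iff_not] at h
  unfold pvLexLE
  omega

lemma pvLexLE_trans {a b c : Int × Int × Int} (h1 : pvLexLE a b) (h2 : pvLexLE b c) :
    pvLexLE a c := by
  unfold pvLexLE at *
  omega

lemma pvInsertBy_pairwise (x : Int × Int × Int) (acc : List (Int × Int × Int))
    (h : acc.Pairwise pvLexLE) : (PySem.List.insertBy pvBefore x acc).Pairwise pvLexLE := by
  induction acc with
  | nil => simp [PySem.List.insertBy]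
  | cons y ys ih =>
    rw [List.pairwise_cons] at h
    by_cases hb : pvBefore x y = true
    · rw [show PySem.List.insertBy pvBefore x (y :: ys) = x :: y :: ys by
        simp [PySem.List.insertBy, hb]]
      refine List.Pairwise.cons ?_ (List.Pairwise.cons h.1 h.2)
      intro z hz
      rcases List.mem_cons.mp hz with rfl | hz
      · exact pvBefore_true hb
      · exact pvLexLE_trans (pvBefore_true hb) (h.1 z hz)
    · rw [show PySem.List.insertBy pvBefore x (y :: ys) = y :: PySem.List.insertBy pvBefore x ys by
        simp [PySem.List.insertBy, hb]]
      refine List.Pairwise.cons ?_ (ih h.2)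
      intro z hz
      rcases (PySem.List.mem_insertBy pvBefore x z ys).mp hz with rfl | hz
      · exact pvBefore_false (Bool.eq_false_iff.mpr hb)
      · exact h.1 z hz

lemma pvFoldlInsert_pairwise (xs acc : List (Int × Int × Int)) (h : acc.Pairwise pvLexLE) :
    (xs.foldl (fun acc x => PySem.List.insertBy pvBefore x acc) acc).Pairwise pvLexLE := by
  induction xs generalizing acc with
  | nil => exact h
  | cons x xs ih => exact ih _ (pvInsertBy_pairwise x acc h)

lemma pvSorted2_pairwise (xs : List (Int × Int × Int)) :
    (PySem.List.sorted2 xs (fun t => t.1) (fun t => -t.2.1)).Pairwise pvLexLE := by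
  have : PySem.List.sorted2 xs (fun t => t.1) (fun t => -t.2.1) =
      xs.foldl (fun acc x => PySem.List.insertBy pvBefore x acc) [] := rfl
  rw [this]
  exact pvFoldlInsert_pairwise xs [] List.Pairwise.nil

def pvCond (m : Option Int) (t : Int × Int × Int) (rest : List (Int × Int × Int)) : Bool :=
  (match m with | some mm => decide (t.2.1 ≤ mm) | none => false) ||
  (match rest with | u :: _ => decide (u.1 = t.1) && decide (u.2.1 = t.2.1) | [] => false)
def pvMax (m : Option Int) (e : Int) : Int :=
  match m with | some mm => max mm e | none => e

lemma pvSweep_mem (l : List (Int × Int × Int)) (hs : l.Pairwise pvLexLE)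
    (hn : (l.map (fun t => t.2.2)).Nodup) (m : Option Int) (rem : PySem.Set Int) (x : Int) :
    x ∈ pvSweep l m rem ↔ x ∈ rem ∨ ∃ t ∈ l, t.2.2 = x ∧
      (pvMGE m t.2.1 ∨ ∃ u ∈ l, u ≠ t ∧ u.1 ≤ t.1 ∧ t.2.1 ≤ u.2.1) := by
  revert hs hn
  induction l generalizing m rem with
  | nil => intro _ _; simp [pvSweep]
  | cons t rest ih =>
    intro hs hn
    have hhd : ∀ u ∈ rest, pvLexLE t u := (List.pairwise_cons.mp hs).1
    have hr : rest.Pairwise pvLexLE := (List.pairwise_cons.mp hs).2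
    have hti : t.2.2 ∉ rest.map (fun u => u.2.2) := by
      simp only [List.map_cons, List.nodup_cons] at hn; exact hn.1
    have hnr : (rest.map (fun u => u.2.2)).Nodup := by
      simp only [List.map_cons, List.nodup_cons] at hn; exact hn.2
    have hne_t : ∀ u ∈ rest, u ≠ t := by
      intro u hu he
      exact hti (he ▸ List.mem_map_of_mem hu)
    rw [show pvSweep (t :: rest) m rem = pvSweep rest (some (pvMax m t.2.1))
        (if pvCond m t rest then PySem.Set.add rem t.2.2 else rem) from rfl]
    rw [ih _ _ hr hnr]
    have hhead_iff : (match rest with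
        | u :: _ => decide (u.1 = t.1) && decide (u.2.1 = t.2.1) | [] => false) = true ↔
        ∃ u ∈ rest, u.1 = t.1 ∧ u.2.1 = t.2.1 := by
      cases rest with
      | nil => simp
      | cons v tail =>
        simp only [Bool.and_eq_true, decide_eq_true_eq]
        constructor
        · rintro ⟨h1, h2⟩
          exact ⟨v, by simp, h1, h2⟩
        · rintro ⟨u, hu, h1, h2⟩
          have hv : pvLexLE t v := hhd v (by simp)
          rcases List.mem_cons.mp hu with rfl | hu'
          · exact ⟨h1, h2⟩
          · have hvu : pvLexLE v u := (List.pairwise_cons.mp hr).1 u hu'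
            unfold pvLexLE at hv hvu
            constructor <;> omega
    have hc_iff : pvCond m t rest = true ↔
        (pvMGE m t.2.1 ∨ ∃ u ∈ rest, u.1 = t.1 ∧ u.2.1 = t.2.1) := by
      cases m with
      | none => simp only [pvCond, Bool.false_or, hhead_iff, pvMGE]; tauto
      | some mm =>
        simp only [pvCond, Bool.or_eq_true, decide_eq_true_eq, hhead_iff, pvMGE]
    have hM_iff : ∀ y : Int, pvMGE (some (pvMax m t.2.1)) y ↔ pvMGE m y ∨ y ≤ t.2.1 := by
      intro y
      cases m with
      | none => simp [pvMGE, pvMax]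
      | some mm => simp only [pvMGE, pvMax]; omega
    have hrem' : ∀ z : Int, z ∈ (if pvCond m t rest then PySem.Set.add rem t.2.2 else rem) ↔
        z ∈ rem ∨ ((pvMGE m t.2.1 ∨ ∃ u ∈ rest, u.1 = t.1 ∧ u.2.1 = t.2.1) ∧ z = t.2.2) := by
      intro z
      by_cases hc : pvCond m t rest = true
      · rw [if_pos hc, PySem.Set.mem_add]
        constructor
        · rintro (h | h)
          exacts [Or.inl h, Or.inr ⟨hc_iff.mp hc, h⟩]
        · rintro (h | ⟨_, h⟩)
          exacts [Or.inl h, Or.inr h]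
      · rw [if_neg hc]
        refine ⟨Or.inl, fun h => ?_⟩
        rcases h with h | ⟨hcp, _⟩
        · exact h
        · exact absurd (hc_iff.mpr hcp) hc
    have hF3 : (∃ u ∈ t :: rest, u ≠ t ∧ u.1 ≤ t.1 ∧ t.2.1 ≤ u.2.1) ↔
        ∃ u ∈ rest, u.1 = t.1 ∧ u.2.1 = t.2.1 := by
      constructor
      · rintro ⟨u, hu, hne, h1, h2⟩
        rcases List.mem_cons.mp hu with rfl | hu'
        · exact absurd rfl hne
        · have := hhd u hu'
          unfold pvLexLE at this
          exact ⟨u, hu', by omega, by omega⟩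
      · rintro ⟨u, hu, h1, h2⟩
        exact ⟨u, List.mem_cons_of_mem _ hu, hne_t u hu, le_of_eq h1, le_of_eq h2.symm⟩
    constructor
    · rintro (hx | ⟨t', ht', hidx, hcase⟩)
      · rcases (hrem' x).mp hx with hx' | ⟨hcp, rfl⟩
        · exact Or.inl hx'
        · exact Or.inr ⟨t, by simp, rfl, hcp.imp id hF3.mpr⟩
      · refine Or.inr ⟨t', List.mem_cons_of_mem _ ht', hidx, ?_⟩
        rcases hcase with hm | hex
        · rcases (hM_iff t'.2.1).mp hm with hm' | hle
          · exact Or.inl hm'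
          · refine Or.inr ⟨t, by simp, Ne.symm (hne_t t' ht'), ?_, hle⟩
            have := hhd t' ht'
            unfold pvLexLE at this
            omega
        · obtain ⟨u, hu, h⟩ := hex
          exact Or.inr ⟨u, List.mem_cons_of_mem _ hu, h⟩
    · rintro (hx | ⟨t', ht', hidx, hcase⟩)
      · exact Or.inl ((hrem' x).mpr (Or.inl hx))
      · rcases List.mem_cons.mp ht' with rfl | ht''
        · exact Or.inl ((hrem' x).mpr (Or.inr ⟨hcase.imp id hF3.mp, hidx.symm⟩))
        · refine Or.inr ⟨t', ht'', hidx, ?_⟩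
          rcases hcase with hm | hex
          · exact Or.inl ((hM_iff _).mpr (Or.inl hm))
          · rcases hex with ⟨u, hu, hneu, h1, h2⟩
            rcases List.mem_cons.mp hu with rfl | hu'
            · exact Or.inl ((hM_iff _).mpr (Or.inr h2))
            · exact Or.inr ⟨u, hu', hneu, h1, h2⟩

-- proof-side views of B's pipeline over Int indices
def pvTrip (al : List (List String)) (k : Int) : Int × Int × Int := pvTriple k (pvRow al k)
def pvIdxQ (al : List (List String)) (q : String) : List Int :=
  (PySem.List.pyRange 0 (PySem.List.len al) 1).filter (fun j => pvRowQ (pvRow al j) == q)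
def pvByq (al : List (List String)) : PySem.Dict String (List Int) :=
  (PySem.List.enumerate al).foldl
    (fun d p => d.modify (pvRowQ p.2) [] (fun l => l ++ [p.1])) PySem.Dict.empty
def pvByc (al : List (List String)) (idxs : List Int) : PySem.Dict String (List Int) :=
  idxs.foldl (fun d k =>
    d.modify (pvRowC (PySem.List.pyGetD al k [])) [] (fun l => l ++ [k])) PySem.Dict.empty
def pvHitKs (al : List (List String)) (ks : List Int) (x : Int) : Prop :=
  ∃ t ∈ ks.map (pvTrip al), t.2.2 = x ∧
    ∃ u ∈ ks.map (pvTrip al), u ≠ t ∧ u.1 ≤ t.1 ∧ t.2.1 ≤ u.2.1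
def pvHitQ (al : List (List String)) (idxs : List Int) (x : Int) : Prop :=
  ∃ v ∈ (pvByc al idxs).values, pvHitKs al v x

lemma pvGetD_group {κ β : Type} [BEq κ] [LawfulBEq κ] (l : List β) (key : β → κ)
    (val : β → Int) (c : κ) :
    (l.foldl (fun d b => d.modify (key b) [] (fun s => s ++ [val b]))
        PySem.Dict.empty).getD c [] = (l.filter (fun b => key b == c)).map val := by
  have h := PySem.Dict.getD_foldl_modify_append (l.map (fun b => (key b, val b)))
    PySem.Dict.empty c
  rw [List.foldl_map, List.filter_map, List.map_map] at h
  exact h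

lemma pvByq_getD (al : List (List String)) (q : String) :
    (pvByq al).getD q [] = pvIdxQ al q := by
  unfold pvByq
  rw [PySem.List.enumerate_eq_map_pyRange al [], List.foldl_map]
  have h := pvGetD_group (PySem.List.pyRange 0 (PySem.List.len al) 1)
    (fun j => pvRowQ (pvRow al j)) id q
  rw [List.map_id] at h
  exact h

lemma pvByc_getD (al : List (List String)) (idxs : List Int) (c : String) :
    (pvByc al idxs).getD c [] = idxs.filter (fun k => pvRowC (pvRow al k) == c) := by
  unfold pvByc
  have h := pvGetD_group idxs (fun k => pvRowC (pvRow al k)) id c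
  rw [List.map_id] at h
  exact h

lemma pvByq_values (al : List (List String)) :
    ∀ v ∈ (pvByq al).values, ∃ q, v = pvIdxQ al q := by
  have hnd : (pvByq al).keys.Nodup := by
    unfold pvByq
    rw [PySem.List.enumerate_eq_map_pyRange al [], List.foldl_map]
    exact PySem.Dict.nodup_keys_foldl_modify_key _ _ _ _ _ PySem.Dict.nodup_keys_empty
  intro v hv
  rw [PySem.Dict.values_eq_map_keys _ hnd []] at hv
  rcases List.mem_map.mp hv with ⟨q, _, rfl⟩
  exact ⟨q, pvByq_getD al q⟩

lemma pvByc_values (al : List (List String)) (idxs : List Int) :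
    ∀ v ∈ (pvByc al idxs).values, ∃ c, v = idxs.filter (fun k => pvRowC (pvRow al k) == c) := by
  have hnd : (pvByc al idxs).keys.Nodup := by
    unfold pvByc
    exact PySem.Dict.nodup_keys_foldl_modify_key _ _ _ _ _ PySem.Dict.nodup_keys_empty
  intro v hv
  rw [PySem.Dict.values_eq_map_keys _ hnd []] at hv
  rcases List.mem_map.mp hv with ⟨c, _, rfl⟩
  exact ⟨c, pvByc_getD al idxs c⟩

lemma pvHitKs_len (al : List (List String)) (ks : List Int) (x : Int)
    (h : pvHitKs al ks x) : 2 ≤ ks.length := by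
  rcases h with ⟨t, ht, -, u, hu, hne, -⟩
  match ks with
  | [] => simp at ht
  | [k] =>
    simp only [List.map_cons, List.map_nil, List.mem_singleton] at ht hu
    exact absurd (hu.trans ht.symm) hne
  | a :: b :: l => simp

lemma pvSweepKs_mem (al : List (List String)) (ks : List Int) (hnd : ks.Nodup)
    (rem : PySem.Set Int) (x : Int) :
    x ∈ pvSweep (PySem.List.sorted2 (ks.map (pvTrip al)) (fun t => t.1) (fun t => -t.2.1))
        none rem ↔ x ∈ rem ∨ pvHitKs al ks x := by
  have hperm := PySem.List.sorted2_perm (ks.map (pvTrip al)) (fun t => t.1)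
    (fun t => -t.2.1) false
  have hid : (ks.map (pvTrip al)).map (fun t => t.2.2) = ks := by
    rw [List.map_map]
    exact List.map_id _
  have hn : ((PySem.List.sorted2 (ks.map (pvTrip al)) (fun t => t.1)
      (fun t => -t.2.1)).map (fun t => t.2.2)).Nodup :=
    ((hperm.map _).nodup_iff).mpr (by rw [hid]; exact hnd)
  rw [pvSweep_mem _ (pvSorted2_pairwise _) hn]
  have hm : ∀ a : Int × Int × Int,
      a ∈ PySem.List.sorted2 (ks.map (pvTrip al)) (fun t => t.1) (fun t => -t.2.1) ↔
        a ∈ ks.map (pvTrip al) := fun a => hperm.mem_iff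
  unfold pvHitKs
  simp only [hm, pvMGE, false_or]

lemma pvFoldl_mem {κ : Type} (step : PySem.Set Int → κ → PySem.Set Int) (Φ : κ → Prop)
    (x : Int) :
    ∀ (ks : List κ), (∀ k ∈ ks, ∀ rem, x ∈ step rem k ↔ x ∈ rem ∨ Φ k) →
      ∀ rem : PySem.Set Int, x ∈ ks.foldl step rem ↔ x ∈ rem ∨ ∃ k ∈ ks, Φ k := by
  intro ks
  induction ks with
  | nil => intro _ rem; simp
  | cons k ks ih =>
    intro h rem
    simp only [List.foldl_cons]
    rw [ih (fun a ha => h a (List.mem_cons_of_mem _ ha)), h k (by simp),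
      List.exists_mem_cons_iff]
    exact or_assoc

lemma pvStepC_mem (al : List (List String)) (ks : List Int) (hnd : ks.Nodup)
    (rem : PySem.Set Int) (x : Int) :
    x ∈ (if ks.length < 2 then rem
        else pvSweep (PySem.List.sorted2 (ks.map (fun k => pvTriple k (PySem.List.pyGetD al k [])))
          (fun t => t.1) (fun t => -t.2.1)) none rem) ↔ x ∈ rem ∨ pvHitKs al ks x := by
  split_ifs with hlen
  · refine ⟨Or.inl, fun h => ?_⟩
    rcases h with h | h
    · exact h
    · exact absurd (pvHitKs_len al ks x h) (by omega)
  · exact pvSweepKs_mem al ks hnd rem x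

lemma pvStepQ_mem (al : List (List String)) (idxs : List Int) (hnd : idxs.Nodup)
    (rem : PySem.Set Int) (x : Int) :
    x ∈ (if idxs.length < 2 then rem
        else (pvByc al idxs).values.foldl (fun rem ks =>
          if ks.length < 2 then rem
          else pvSweep (PySem.List.sorted2
              (ks.map (fun k => pvTriple k (PySem.List.pyGetD al k [])))
              (fun t => t.1) (fun t => -t.2.1)) none rem) rem) ↔
      x ∈ rem ∨ pvHitQ al idxs x := by
  have hvals : ∀ v ∈ (pvByc al idxs).values, v.Nodup := by
    intro v hv
    rcases pvByc_values al idxs v hv with ⟨c, rfl⟩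
    exact hnd.filter _
  have hfold := pvFoldl_mem (fun rem ks =>
      if ks.length < 2 then rem
      else pvSweep (PySem.List.sorted2
          (ks.map (fun k => pvTriple k (PySem.List.pyGetD al k [])))
          (fun t => t.1) (fun t => -t.2.1)) none rem) (fun ks => pvHitKs al ks x) x
    (pvByc al idxs).values
    (fun ks hks rem => pvStepC_mem al ks (hvals ks hks) rem x) rem
  split_ifs with hlen
  · refine ⟨Or.inl, fun h => ?_⟩
    rcases h with h | ⟨v, hv, hhit⟩
    · exact h
    · rcases pvByc_values al idxs v hv with ⟨c, rfl⟩
      have h2 := pvHitKs_len al _ x hhit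
      have h3 := List.length_filter_le (fun k => pvRowC (pvRow al k) == c) idxs
      omega
  · exact hfold

lemma pvB_mem (al : List (List String)) (x : Int) :
    (let byq : PySem.Dict String (List Int) :=
      (PySem.List.enumerate al).foldl
        (fun d p => d.modify (pvRowQ p.2) [] (fun l => l ++ [p.1])) PySem.Dict.empty
     x ∈ byq.values.foldl (fun rem idxs =>
      if idxs.length < 2 then rem
      else
        let byc : PySem.Dict String (List Int) :=
          idxs.foldl (fun d k =>
            d.modify (pvRowC (PySem.List.pyGetD al k [])) [] (fun l => l ++ [k]))
            PySem.Dict.empty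
        byc.values.foldl (fun rem ks =>
          if ks.length < 2 then rem
          else
            pvSweep (PySem.List.sorted2
                (ks.map (fun k => pvTriple k (PySem.List.pyGetD al k [])))
                (fun t => t.1) (fun t => -t.2.1)) none rem) rem) PySem.Set.empty) ↔
      x ∈ PySem.List.pyRange 0 (PySem.List.len al) 1 ∧ pvRem al x := by
  dsimp only
  show x ∈ (pvByq al).values.foldl _ PySem.Set.empty ↔ _
  have hvq : ∀ v ∈ (pvByq al).values, v.Nodup := by
    intro v hv
    rcases pvByq_values al v hv with ⟨q, rfl⟩
    exact (PySem.List.nodup_pyRange_one 0 (PySem.List.len al)).filter _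
  refine (pvFoldl_mem _ (fun idxs => pvHitQ al idxs x) x (pvByq al).values
    (fun idxs hidxs rem => pvStepQ_mem al idxs (hvq idxs hidxs) rem x)
    PySem.Set.empty).trans ?_
  have hempty : x ∉ (PySem.Set.empty : PySem.Set Int) := by simp [PySem.Set.empty]
  constructor
  · rintro (h | ⟨idxs, hidxs, v, hv, t, ht, rfl, u, hu, hne, h1, h2⟩)
    · exact absurd h hempty
    · rcases pvByq_values al idxs hidxs with ⟨q, rfl⟩
      rcases pvByc_values al _ v hv with ⟨c, rfl⟩
      rcases List.mem_map.mp ht with ⟨kt, hkt, rfl⟩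
      rcases List.mem_map.mp hu with ⟨ku, hku, rfl⟩
      rcases List.mem_filter.mp hkt with ⟨hktq, hktc⟩
      rcases List.mem_filter.mp hku with ⟨hkuq, hkuc⟩
      rcases List.mem_filter.mp hktq with ⟨hktr, hktq0⟩
      rcases List.mem_filter.mp hkuq with ⟨hkur, hkuq0⟩
      simp only [pvTrip, pvTriple, beq_iff_eq] at hne h1 h2 hktq0 hkuq0 hktc hkuc ⊢
      refine ⟨hktr, ku, hkur, ?_, ?_, h1, h2⟩
      · intro h
        exact hne (by rw [h])
      · unfold pvKey
        rw [hkuq0, hktq0, hkuc, hktc]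
  · rintro ⟨hx, j, hj, hne, hkey, hs', he'⟩
    simp only [pvKey, Prod.mk.injEq] at hkey
    have hxq : x ∈ pvIdxQ al (pvRowQ (pvRow al x)) :=
      List.mem_filter.mpr ⟨hx, by simp⟩
    have hjq : j ∈ pvIdxQ al (pvRowQ (pvRow al x)) :=
      List.mem_filter.mpr ⟨hj, by simp [hkey.1]⟩
    have hxc : x ∈ (pvIdxQ al (pvRowQ (pvRow al x))).filter
        (fun k => pvRowC (pvRow al k) == pvRowC (pvRow al x)) :=
      List.mem_filter.mpr ⟨hxq, by simp⟩
    have hjc : j ∈ (pvIdxQ al (pvRowQ (pvRow al x))).filter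
        (fun k => pvRowC (pvRow al k) == pvRowC (pvRow al x)) :=
      List.mem_filter.mpr ⟨hjq, by simp [hkey.2]⟩
    refine Or.inr ⟨pvIdxQ al (pvRowQ (pvRow al x)), ?_,
      (pvIdxQ al (pvRowQ (pvRow al x))).filter
        (fun k => pvRowC (pvRow al k) == pvRowC (pvRow al x)), ?_,
      pvTrip al x, List.mem_map_of_mem hxc, rfl,
      pvTrip al j, List.mem_map_of_mem hjc,
      fun h => hne (congrArg (fun v => v.2.2) h), hs', he'⟩
    · -- pvIdxQ al q ∈ (pvByq al).values
      have hnd : (pvByq al).keys.Nodup := by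
        unfold pvByq
        rw [PySem.List.enumerate_eq_map_pyRange al [], List.foldl_map]
        exact PySem.Dict.nodup_keys_foldl_modify_key _ _ _ _ _ PySem.Dict.nodup_keys_empty
      rw [PySem.Dict.values_eq_map_keys _ hnd []]
      refine List.mem_map.mpr ⟨pvRowQ (pvRow al x), ?_, pvByq_getD al _⟩
      unfold pvByq
      rw [PySem.Dict.keys_foldl_modify_key, PySem.Dict.keys_empty,
        PySem.Set.update_nil_left, PySem.Set.mem_ofList,
        PySem.List.enumerate_eq_map_pyRange al [], List.map_map]
      exact List.mem_map.mpr ⟨x, hx, rfl⟩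
    · -- the chrom-filtered list ∈ (pvByc al (pvIdxQ al q)).values
      have hnd : (pvByc al (pvIdxQ al (pvRowQ (pvRow al x)))).keys.Nodup := by
        unfold pvByc
        exact PySem.Dict.nodup_keys_foldl_modify_key _ _ _ _ _ PySem.Dict.nodup_keys_empty
      rw [PySem.Dict.values_eq_map_keys _ hnd []]
      refine List.mem_map.mpr ⟨pvRowC (pvRow al x), ?_, pvByc_getD al _ _⟩
      unfold pvByc
      rw [PySem.Dict.keys_foldl_modify_key, PySem.Dict.keys_empty,
        PySem.Set.update_nil_left, PySem.Set.mem_ofList]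
      exact List.mem_map.mpr ⟨x, hxq, rfl⟩

lemma pvOut_eq (al : List (List String)) (S : List Int) :
    ((PySem.List.enumerate al).filter (fun p => !(PySem.Set.contains S p.1))).map
        (fun p => p.2) =
      ((PySem.List.pyRange 0 (PySem.List.len al) 1).filter
          (fun i => !(PySem.Set.contains S i))).map
        (fun i => PySem.List.pyGetD al i []) := by
  rw [PySem.List.enumerate_eq_map_pyRange al [], List.filter_map, List.map_map]
  rfl

-- on lists of fewer than two rows A reads nothing and returns the list itself
lemma pvA_short (al : List (List String)) (h : PySem.List.len al < 2) :
    filter_contained_alignments al = al := by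
  match al, h with
  | [], _ => rfl
  | [a], _ =>
    have hr : PySem.List.pyRange 0 1 1 = [0] := by decide
    simp [filter_contained_alignments, PySem.List.len, hr, PySem.Set.empty,
      PySem.Set.contains, PySem.List.pyGetD]
  | a :: b :: l, h =>
    exfalso
    simp [PySem.List.len] at h
    omega

-- ===== VERDICT (by name: the statement is the Claim_ definition above) =====
theorem filter_contained_alignments_spec : Claim_equal_filter_contained_alignments := by
  intro al _ _
  show filter_contained_alignments al = filter_contained_alignments_alt al
  by_cases hlen : PySem.List.len al < 2
  · rw [pvA_short al hlen]
    unfold filter_contained_alignments_alt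
    rw [if_pos hlen]
  · unfold filter_contained_alignments filter_contained_alignments_alt
    rw [if_neg hlen]
    dsimp only
    rw [pvOut_eq]
    refine congrArg _ (List.filter_congr fun i hi => congrArg (fun b => !b) ?_)
    refine Bool.coe_iff_coe.mp ?_
    rw [PySem.Set.contains_iff, PySem.Set.contains_iff]
    exact (pvA_mem al i).trans (pvB_mem al i).symm
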